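-- pv_equiv track=rewrite | github.com/aguslugea/SINTAXIS_TP_1 | lexer.py | automata_id
-- ===== SOURCE A (Python) =====
-- ESTADO_TRAMPA = "TRAMPA"
--
-- ESTADO_FINAL = "ACEPTADO"
--
-- ESTADO_NO_FINAL = "NO ACEPTADO"
--
-- def condicion_cadena(estado_actual1, estados_finaless):
--
--     if estado_actual1 == -1:
--         return ESTADO_TRAMPA
--     if estado_actual1 in estados_finaless:
--         return ESTADO_FINAL
--     else:
--         return ESTADO_NO_FINAL
--
-- def automata_id(cadena):
--
--     letras = ["a", "b", "c", "d", "e", "f", "g", "h", "i", "j", "k", "l", "m", "n", "ñ", "o", "p", "q", "r", "s", "t", "u", "v", "w", "x", "y",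
--               "z", "A", "B", "C", "D", "E", "F", "G", "H", "I", "J", "K", "L", "M", "N", "Ñ", "O", "P", "Q", "R", "S", "T", "U", "V", "W", "X", "Y", "Z"]
--     numeros = ["0", "1", "2", "3", "4", "5", "6", "7", "8", "9"]
--     estado_actual = 0
--     estados_finales = [1]
--     for caracter in cadena:
--         if estado_actual == 0 and caracter in letras:
--             estado_actual = 1
--         elif estado_actual == 1 and (caracter in letras or caracter in numeros):
--             estado_actual = 1
--         else:
--             estado_actual = -1
--     return condicion_cadena(estado_actual, estados_finales)
-- ===== SOURCE B (Python) =====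
-- ESTADO_TRAMPA = "TRAMPA"
-- ESTADO_FINAL = "ACEPTADO"
-- ESTADO_NO_FINAL = "NO ACEPTADO"
--
-- LETRAS = "abcdefghijklmnñopqrstuvwxyzABCDEFGHIJKLMNÑOPQRSTUVWXYZ"
-- DIGITOS = "0123456789"
--
-- def automata_id(cadena):
--     if not cadena:
--         return ESTADO_NO_FINAL
--     if cadena[0] in LETRAS and all(c in LETRAS or c in DIGITOS for c in cadena[1:]):
--         return ESTADO_FINAL
--     return ESTADO_TRAMPA
-- ===== Notes on version B (the rewrite author's own statement) =====
-- stated objective: simpler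
-- what changed: Replaced the per-character DFA state-transition loop and the condicion_cadena helper with an empty-string guard plus a single all()-based membership predicate over the tail.
import Mathlib
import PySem

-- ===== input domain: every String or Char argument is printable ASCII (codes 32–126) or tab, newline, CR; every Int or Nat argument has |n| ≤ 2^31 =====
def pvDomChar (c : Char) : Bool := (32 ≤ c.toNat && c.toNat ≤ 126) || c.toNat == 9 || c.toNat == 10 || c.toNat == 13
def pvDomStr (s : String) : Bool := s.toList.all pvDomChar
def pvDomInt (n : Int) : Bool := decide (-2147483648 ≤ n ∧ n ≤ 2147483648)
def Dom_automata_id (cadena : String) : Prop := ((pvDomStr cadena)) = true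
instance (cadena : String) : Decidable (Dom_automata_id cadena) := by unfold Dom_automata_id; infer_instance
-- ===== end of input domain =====

-- B replaces A's per-character DFA loop by an empty-string guard plus one all()-membership predicate (objective: simpler).

-- ===== PORT A =====
def pvLetras : List Char :=
  ['a','b','c','d','e','f','g','h','i','j','k','l','m','n','ñ','o','p','q','r','s','t','u','v','w','x','y',
   'z','A','B','C','D','E','F','G','H','I','J','K','L','M','N','Ñ','O','P','Q','R','S','T','U','V','W','X','Y','Z']

def pvNumeros : List Char := ['0','1','2','3','4','5','6','7','8','9']

def condicion_cadena (estado_actual1 : Int) (estados_finaless : List Int) : String :=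
  if estado_actual1 = -1 then "TRAMPA"
  else if estado_actual1 ∈ estados_finaless then "ACEPTADO"
  else "NO ACEPTADO"

def pvStep (estado : Int) (caracter : Char) : Int :=
  if estado = 0 ∧ caracter ∈ pvLetras then 1
  else if estado = 1 ∧ (caracter ∈ pvLetras ∨ caracter ∈ pvNumeros) then 1
  else -1

def automata_id (cadena : String) : String :=
  condicion_cadena (cadena.toList.foldl pvStep 0) [1]

-- ===== PORT B =====
def pvLETRAS : List Char := "abcdefghijklmnñopqrstuvwxyzABCDEFGHIJKLMNÑOPQRSTUVWXYZ".toList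
def pvDIGITOS : List Char := "0123456789".toList

def automata_id_alt (cadena : String) : String :=
  match cadena.toList with
  | [] => "NO ACEPTADO"
  | h :: t =>
    if h ∈ pvLETRAS ∧ t.all (fun c => c ∈ pvLETRAS ∨ c ∈ pvDIGITOS) then "ACEPTADO"
    else "TRAMPA"

-- ===== PRECONDITION & SPEC =====
def Spec_automata_id (cadena : String) (out : String) : Prop := out = automata_id_alt cadena
instance (cadena : String) (out : String) : Decidable (Spec_automata_id cadena out) := by unfold Spec_automata_id; infer_instance

-- ===== CLAIM (what is proved, stated in full; the proofs are below) =====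
def Claim_equal_automata_id : Prop := ∀ (cadena : String), Dom_automata_id cadena → Spec_automata_id cadena (automata_id cadena)

-- ===== LEMMAS AND PROOFS =====
theorem pvLetras_eq : pvLETRAS = pvLetras := by decide
theorem pvNumeros_eq : pvDIGITOS = pvNumeros := by decide

theorem foldl_trap (t : List Char) : t.foldl pvStep (-1) = -1 := by
  induction t with
  | nil => rfl
  | cons c t ih => simpa [pvStep] using ih

theorem foldl_one (t : List Char) :
    t.foldl pvStep 1 = (if t.all (fun c => decide (c ∈ pvLetras ∨ c ∈ pvNumeros)) then 1 else -1) := by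
  induction t with
  | nil => rfl
  | cons c t ih =>
    by_cases h : c ∈ pvLetras ∨ c ∈ pvNumeros
    · simp [List.foldl, pvStep, h, ih]
    · have h1 : c ∉ pvLetras := fun hc => h (Or.inl hc)
      have h2 : c ∉ pvNumeros := fun hc => h (Or.inr hc)
      simp [List.foldl, pvStep, h1, h2, foldl_trap]

-- ===== VERDICT (by name: the statement is the Claim_ definition above) =====
theorem automata_id_spec : Claim_equal_automata_id := by
  intro cadena _
  unfold Spec_automata_id automata_id automata_id_alt
  rw [pvLetras_eq, pvNumeros_eq]
  cases hl : cadena.toList with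
  | nil => rfl
  | cons h t =>
    by_cases hm : h ∈ pvLetras
    · have hstep : pvStep 0 h = 1 := by simp [pvStep, hm]
      simp only [List.foldl, hstep, foldl_one]
      by_cases ha : (t.all (fun c => decide (c ∈ pvLetras ∨ c ∈ pvNumeros))) = true
      · rw [if_pos ha, if_pos ⟨hm, ha⟩]; rfl
      · rw [if_neg ha, if_neg (fun hc => ha hc.2)]; rfl
    · have hstep : pvStep 0 h = -1 := by simp [pvStep, hm]
      simp only [List.foldl, hstep, foldl_trap]
      rw [if_neg (fun hc => hm hc.1)]; rfl
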